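-- pv_equiv track=rewrite | github.com/BaeJihae/coding-test | 백준/Silver/5107. 마니또/마니또.py | cycle_graph
-- ===== SOURCE A (Python) =====
-- def cycle_graph(graph):
--     visited = {}
--     cycle_count = 0
--
--     def dfs(n):
--         visited[n] = 1
--
--         for neighbor in graph.get(n, []):
--             if visited.get(neighbor, 0) == 1:
--                 return True
--             elif visited.get(neighbor, 0) == 0:
--                 if dfs(neighbor):
--                     return True
--         visited[n] = 2
--         return False
--
--     for node in graph.keys():
--         if visited.get(node, 0) == 0:
--             if dfs(node):
--                 cycle_count += 1
--
--     return cycle_count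
-- ===== SOURCE B (Python) =====
-- def cycle_graph(graph):
--     # Event-stack DFS: one flat stack of (is_exit, node) events per root, no per-frame
--     # neighbour cursors; neighbours are pushed reversed so pop order matches A's recursion.
--     color = {}
--     count = 0
--     for root in graph:
--         if color.get(root, 0) != 0:
--             continue
--         stack = [(False, root)]
--         found = False
--         while stack:
--             is_exit, n = stack.pop()
--             if is_exit:
--                 color[n] = 2
--                 continue
--             c = color.get(n, 0)
--             if c == 1:
--                 found = True
--                 break
--             if c != 0:
--                 continue
--             color[n] = 1
--             stack.append((True, n))
--             for nb in reversed(graph.get(n, [])):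
--                 stack.append((False, nb))
--         if found:
--             count += 1
--     return count
-- ===== Notes on version B (the rewrite author's own statement) =====
-- stated objective: alternative
-- what changed: A's recursive nested dfs is replaced by an iterative DFS over one flat stack of (is_exit, node) events: neighbours are pushed reversed at enter time and colour checks happen at pop time, so there are no per-frame neighbour cursors and no recursion; the outer loop over the keys is kept.
import Mathlib
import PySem

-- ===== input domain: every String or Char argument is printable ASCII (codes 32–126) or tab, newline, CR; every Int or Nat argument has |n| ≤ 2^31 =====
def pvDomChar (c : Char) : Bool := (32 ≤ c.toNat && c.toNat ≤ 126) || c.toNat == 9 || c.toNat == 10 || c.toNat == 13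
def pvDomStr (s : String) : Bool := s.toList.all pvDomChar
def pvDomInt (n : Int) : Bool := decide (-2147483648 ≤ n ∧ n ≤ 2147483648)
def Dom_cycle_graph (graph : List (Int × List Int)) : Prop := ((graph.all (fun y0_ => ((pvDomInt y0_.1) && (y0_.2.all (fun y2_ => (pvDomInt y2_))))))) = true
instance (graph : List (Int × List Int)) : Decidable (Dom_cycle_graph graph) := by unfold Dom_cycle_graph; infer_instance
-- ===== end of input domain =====

-- A's recursive dfs vs B's flat event-stack DFS; return values proved equal on every input.

-- ===== PORT A =====
-- graph.get(n, []) on the assoc list (first match, as a dict has unique keys)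
def nbrsA (g : List (Int × List Int)) (n : Int) : List Int :=
  match g.find? (fun p => p.1 == n) with
  | some p => p.2
  | none => []

-- the body of A's dfs: n is already marked gray, rem is the remaining neighbour list;
-- fuel only guards termination (each unit is one recursive dfs entry; never exhausted when
-- started with enough fuel, as each entry grays a white node)
def goA (g : List (Int × List Int)) : Nat → Int → List Int → PySem.Dict Int Int → Bool × PySem.Dict Int Int
  | _, n, [], v => (false, v.insert n 2)
  | fuel, n, nb :: rest, v =>
    if v.getD nb 0 = 1 then (true, v)
    else if v.getD nb 0 = 0 then
      match fuel with
      | 0 => (false, v)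
      | f + 1 =>
        let r := goA g f nb (nbrsA g nb) (v.insert nb 1)
        if r.1 then (true, r.2) else goA g (f + 1) n rest r.2
    else goA g fuel n rest v
  termination_by fuel _ rem _ => (fuel, rem.length)

def fuelA (g : List (Int × List Int)) : Nat := (g.flatMap Prod.snd).length

def cycle_graph (graph : List (Int × List Int)) : Int :=
  ((graph.map Prod.fst).foldl (fun (st : Int × PySem.Dict Int Int) node =>
    if st.2.getD node 0 = 0 then
      let r := goA graph (fuelA graph) node (nbrsA graph node) (st.2.insert node 1)
      if r.1 then (st.1 + 1, r.2) else (st.1, r.2)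
    else st) (0, PySem.Dict.empty)).1

-- ===== PORT B =====
-- graph.get(n, []) written via Option.elim
def adj (g : List (Int × List Int)) (n : Int) : List Int :=
  (g.find? (fun p => p.1 == n)).elim [] Prod.snd

-- Source B's while loop: one flat stack of events (true = exit marker, false = enter);
-- pushing the reversed neighbour list and popping from the end is prepending the
-- neighbour list in order ((adj g n).map … ++ …).  fuel drops once per pop (pure
-- termination guard, never exhausted with fuelE).
def machE (g : List (Int × List Int)) : Nat → List (Bool × Int) → PySem.Dict Int Int → Bool × PySem.Dict Int Int
  | 0, _, v => (false, v)
  | _ + 1, [], v => (false, v)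
  | f + 1, (true, n) :: s, v => machE g f s (v.insert n 2)
  | f + 1, (false, n) :: s, v =>
    if v.getD n 0 = 1 then (true, v)
    else if v.getD n 0 = 0 then
      machE g f ((adj g n).map (fun nb => (false, nb)) ++ (true, n) :: s) (v.insert n 1)
    else machE g f s v

def lbLen (g : List (Int × List Int)) : Nat := (g.map Prod.fst ++ g.flatMap Prod.snd).length

def fuelE (g : List (Int × List Int)) : Nat := (lbLen g + 1) * (lbLen g + 2)

-- Source B's outer for loop over the keys, as structural recursion with the running count
def countB (g : List (Int × List Int)) : List Int → Int → PySem.Dict Int Int → Int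
  | [], cnt, _ => cnt
  | root :: ks, cnt, v =>
    if v.getD root 0 = 0 then
      let r := machE g (fuelE g) [(false, root)] v
      countB g ks (if r.1 then cnt + 1 else cnt) r.2
    else countB g ks cnt v

def cycle_graph_alt (graph : List (Int × List Int)) : Int :=
  countB graph (graph.map Prod.fst) 0 PySem.Dict.empty

-- ===== PRECONDITION & SPEC =====
def Spec_cycle_graph (graph : List (Int × List Int)) (out : Int) : Prop := out = cycle_graph_alt graph
instance (graph : List (Int × List Int)) (out : Int) : Decidable (Spec_cycle_graph graph out) := by unfold Spec_cycle_graph; infer_instance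

-- ===== CLAIM (what is proved, stated in full; the proofs are below) =====
def Claim_equal_cycle_graph : Prop := ∀ (graph : List (Int × List Int)), Dom_cycle_graph graph → Spec_cycle_graph graph (cycle_graph graph)

-- ===== LEMMAS AND PROOFS =====

-- proof-only abbreviations: Uni = all neighbour occurrences (A's fuel universe),
-- UniB = keys ++ neighbour occurrences (B's fuel universe), Wc l v = white count over l
def Uni (g : List (Int × List Int)) : List Int := g.flatMap Prod.snd

def UniB (g : List (Int × List Int)) : List Int := g.map Prod.fst ++ g.flatMap Prod.snd

def Wc (l : List Int) (v : PySem.Dict Int Int) : Nat :=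
  l.countP (fun k => decide (v.getD k 0 = 0))

def PsiE (g : List (Int × List Int)) (s : List (Bool × Int)) (v : PySem.Dict Int Int) : Nat :=
  s.length + (lbLen g + 1) * Wc (UniB g) v

def SOKE (g : List (Int × List Int)) (s : List (Bool × Int)) : Prop :=
  ∀ e ∈ s, e.1 = false → e.2 ∈ UniB g

theorem adj_eq_nbrsA (g : List (Int × List Int)) (n : Int) : adj g n = nbrsA g n := by
  unfold adj nbrsA
  cases g.find? (fun p => p.1 == n) <;> rfl

theorem countP_lt_of {α : Type} (p q : α → Bool) (l : List α)
    (h : ∀ a ∈ l, p a = true → q a = true) (a : α) (ha : a ∈ l)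
    (hp : p a = false) (hq : q a = true) : l.countP p < l.countP q := by
  induction l with
  | nil => cases ha
  | cons b l ih =>
    rcases List.mem_cons.1 ha with rfl | hal
    · rw [List.countP_cons_of_neg (by simp [hp]), List.countP_cons_of_pos hq]
      exact Nat.lt_succ_of_le
        (List.countP_mono_left (fun x hx => h x (List.mem_cons_of_mem _ hx)))
    · have hlt := ih (fun x hx => h x (List.mem_cons_of_mem _ hx)) hal
      by_cases hb : p b = true
      · rw [List.countP_cons_of_pos hb, List.countP_cons_of_pos (h b List.mem_cons_self hb)]
        omega
      · rw [List.countP_cons_of_neg hb, List.countP_cons]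
        omega

theorem nbrs_sub (g : List (Int × List Int)) (n : Int) : ∀ x ∈ nbrsA g n, x ∈ Uni g := by
  intro x hx
  unfold nbrsA at hx
  cases hfind : g.find? (fun p => p.1 == n) with
  | none => rw [hfind] at hx; cases hx
  | some p =>
    rw [hfind] at hx
    have hp : p ∈ g := List.mem_of_find?_eq_some hfind
    exact List.mem_flatMap.2 ⟨p, hp, hx⟩

theorem uni_sub (g : List (Int × List Int)) (x : Int) (hx : x ∈ Uni g) : x ∈ UniB g :=
  List.mem_append.2 (Or.inr hx)

theorem nbrs_len (g : List (Int × List Int)) (n : Int) : (nbrsA g n).length ≤ fuelA g := by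
  unfold nbrsA fuelA
  cases hfind : g.find? (fun p => p.1 == n) with
  | none => simp
  | some p =>
    have hp : p ∈ g := List.mem_of_find?_eq_some hfind
    rw [List.length_flatMap]
    exact List.le_sum_of_mem (List.mem_map.2 ⟨p, hp, rfl⟩)

theorem fuelA_le_lbLen (g : List (Int × List Int)) : fuelA g ≤ lbLen g := by
  unfold fuelA lbLen
  rw [List.length_append]
  omega

theorem Wc_insert_le (l : List Int) (v : PySem.Dict Int Int) (k : Int) (c : Int)
    (hc : c ≠ 0) : Wc l (v.insert k c) ≤ Wc l v := by
  apply List.countP_mono_left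
  intro x _ hx
  simp only [decide_eq_true_eq, PySem.Dict.getD_insert] at hx ⊢
  split at hx
  · exact absurd hx hc
  · exact hx

theorem Wc_insert_lt (l : List Int) (v : PySem.Dict Int Int) (nb : Int)
    (hnb : nb ∈ l) (hw : v.getD nb 0 = 0) : Wc l (v.insert nb 1) < Wc l v := by
  apply countP_lt_of _ _ _ (fun x _ hx => by
      simp only [decide_eq_true_eq, PySem.Dict.getD_insert] at hx ⊢
      split at hx
      · exact absurd hx one_ne_zero
      · exact hx) nb hnb
  · simp
  · simp [hw]

theorem Wc_pos (l : List Int) (v : PySem.Dict Int Int) (nb : Int)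
    (hnb : nb ∈ l) (hw : v.getD nb 0 = 0) : 1 ≤ Wc l v := by
  apply List.countP_pos_iff.2
  exact ⟨nb, hnb, by simp [hw]⟩

theorem Wc_le_len (l : List Int) (v : PySem.Dict Int Int) : Wc l v ≤ l.length :=
  List.countP_le_length

theorem goA_nilE (g : List (Int × List Int)) (fuel : Nat) (n : Int) (v : PySem.Dict Int Int) :
    goA g fuel n [] v = (false, v.insert n 2) := by simp [goA]

theorem goA_gray (g : List (Int × List Int)) (fuel : Nat) (n nb : Int) (rest : List Int)
    (v : PySem.Dict Int Int) (h1 : v.getD nb 0 = 1) :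
    goA g fuel n (nb :: rest) v = (true, v) := by
  rw [goA.eq_def]; simp [h1]

theorem goA_zero (g : List (Int × List Int)) (n nb : Int) (rest : List Int)
    (v : PySem.Dict Int Int) (_h1 : ¬ v.getD nb 0 = 1) (h0 : v.getD nb 0 = 0) :
    goA g 0 n (nb :: rest) v = (false, v) := by
  rw [goA.eq_def]; simp [h0]

theorem goA_white (g : List (Int × List Int)) (n nb : Int) (rest : List Int)
    (v : PySem.Dict Int Int) (f : Nat) (_h1 : ¬ v.getD nb 0 = 1) (h0 : v.getD nb 0 = 0) :
    goA g (f + 1) n (nb :: rest) v =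
      (if (goA g f nb (nbrsA g nb) (v.insert nb 1)).1
       then (true, (goA g f nb (nbrsA g nb) (v.insert nb 1)).2)
       else goA g (f + 1) n rest (goA g f nb (nbrsA g nb) (v.insert nb 1)).2) := by
  rw [goA.eq_def]; simp [h0]

theorem goA_black (g : List (Int × List Int)) (fuel : Nat) (n nb : Int) (rest : List Int)
    (v : PySem.Dict Int Int) (h1 : ¬ v.getD nb 0 = 1) (h0 : ¬ v.getD nb 0 = 0) :
    goA g fuel n (nb :: rest) v = goA g fuel n rest v := by
  rw [goA.eq_def]; simp [h1, h0]

-- A's dfs never un-visits a node: a key white after goA was white before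
theorem goA_preserve (g : List (Int × List Int)) :
    ∀ (fuel : Nat) (n : Int) (rem : List Int) (v : PySem.Dict Int Int) (k : Int),
      ((goA g fuel n rem v).2).getD k 0 = 0 → v.getD k 0 = 0 := by
  intro fuel n rem v
  induction fuel, n, rem, v using goA.induct g with
  | case1 fuel n v =>
    intro k hk
    rw [goA_nilE] at hk
    simp only [PySem.Dict.getD_insert] at hk
    split at hk
    · exact absurd hk two_ne_zero
    · exact hk
  | case2 fuel n nb rest v h1 =>
    intro k hk; rw [goA_gray g fuel n nb rest v h1] at hk; exact hk
  | case3 n nb rest v h1 h0 =>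
    intro k hk; rw [goA_zero g n nb rest v h1 h0] at hk; exact hk
  | case4 n nb rest v h1 h0 f r hr ih1 =>
    intro k hk
    rw [goA_white g n nb rest v f h1 h0, if_pos hr] at hk
    have := ih1 k hk
    simp only [PySem.Dict.getD_insert] at this
    split at this
    · exact absurd this one_ne_zero
    · exact this
  | case5 n nb rest v h1 h0 f r hr ih1 ih2 =>
    intro k hk
    rw [goA_white g n nb rest v f h1 h0, if_neg hr] at hk
    have := ih1 k (ih2 k hk)
    simp only [PySem.Dict.getD_insert] at this
    split at this
    · exact absurd this one_ne_zero
    · exact this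
  | case6 fuel n nb rest v h1 h0 ih =>
    intro k hk
    rw [goA_black g fuel n nb rest v h1 h0] at hk
    exact ih k hk

theorem goA_W_le (g : List (Int × List Int)) (l : List Int) (fuel : Nat) (n : Int)
    (rem : List Int) (v : PySem.Dict Int Int) : Wc l (goA g fuel n rem v).2 ≤ Wc l v := by
  apply List.countP_mono_left
  intro x _ hx
  simp only [decide_eq_true_eq] at hx ⊢
  exact goA_preserve g fuel n rem v x hx

theorem machE_nil (g : List (Int × List Int)) (fuel : Nat) (v : PySem.Dict Int Int) :
    machE g fuel [] v = (false, v) := by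
  cases fuel <;> simp [machE]

-- one extra unit of fuel changes nothing once fuel covers the potential PsiE
theorem machE_mono (g : List (Int × List Int)) :
    ∀ (fuel : Nat) (s : List (Bool × Int)) (v : PySem.Dict Int Int),
      SOKE g s → PsiE g s v ≤ fuel → machE g (fuel + 1) s v = machE g fuel s v := by
  intro fuel
  induction fuel using Nat.strong_induction_on with
  | _ fuel IH =>
    intro s v hs hfuel
    match s with
    | [] => rw [machE_nil, machE_nil]
    | (true, n) :: s' =>
      have h1 : 1 ≤ PsiE g ((true, n) :: s') v := by unfold PsiE; simp; omega
      obtain ⟨f, rfl⟩ : ∃ f, fuel = f + 1 := ⟨fuel - 1, by omega⟩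
      simp only [machE]
      apply IH f (by omega) s' _ (fun e he => hs e (List.mem_cons_of_mem _ he))
      have hW : Wc (UniB g) (v.insert n 2) ≤ Wc (UniB g) v :=
        Wc_insert_le _ v n 2 two_ne_zero
      have : (lbLen g + 1) * Wc (UniB g) (v.insert n 2) ≤ (lbLen g + 1) * Wc (UniB g) v :=
        Nat.mul_le_mul_left _ hW
      unfold PsiE at hfuel ⊢
      simp only [List.length_cons] at hfuel
      omega
    | (false, n) :: s' =>
      have h1 : 1 ≤ PsiE g ((false, n) :: s') v := by unfold PsiE; simp; omega
      obtain ⟨f, rfl⟩ : ∃ f, fuel = f + 1 := ⟨fuel - 1, by omega⟩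
      by_cases hg : v.getD n 0 = 1
      · simp [machE, hg]
      · by_cases h0 : v.getD n 0 = 0
        · have hn : n ∈ UniB g := hs (false, n) List.mem_cons_self rfl
          have hWlt : Wc (UniB g) (v.insert n 1) < Wc (UniB g) v := Wc_insert_lt _ v n hn h0
          have hlen : (adj g n).length ≤ lbLen g := by
            rw [adj_eq_nbrsA]; exact le_trans (nbrs_len g n) (fuelA_le_lbLen g)
          simp only [machE, if_neg hg, if_pos h0]
          apply IH f (by omega)
          · intro e he
            rcases List.mem_append.1 he with hmap | hrest
            · rcases List.mem_map.1 hmap with ⟨x, hx, rfl⟩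
              intro _
              rw [adj_eq_nbrsA] at hx
              exact uni_sub g x (nbrs_sub g n x hx)
            · rcases List.mem_cons.1 hrest with rfl | hs'
              · intro h; cases h
              · exact hs e (List.mem_cons_of_mem _ hs')
          · unfold PsiE at hfuel ⊢
            have hmul : (lbLen g + 1) * (Wc (UniB g) (v.insert n 1) + 1) ≤
                (lbLen g + 1) * Wc (UniB g) v := Nat.mul_le_mul_left _ (by omega)
            rw [Nat.mul_add, Nat.mul_one] at hmul
            simp only [List.length_append, List.length_map, List.length_cons] at hfuel ⊢
            omega
        · simp only [machE, if_neg hg, if_neg h0]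
          apply IH f (by omega) s' _ (fun e he => hs e (List.mem_cons_of_mem _ he))
          unfold PsiE at hfuel ⊢
          simp only [List.length_cons] at hfuel
          omega

-- the simulation: the events 'enter each of rem, then exit n' of B run A's dfs body on
-- frame (n, rem) and continue with the rest of the event stack
theorem main_sim (g : List (Int × List Int)) :
    ∀ (m : Nat) (n : Int) (rem : List Int) (v : PySem.Dict Int Int)
      (s : List (Bool × Int)) (fa fb : Nat),
      (fuelA g + 1) * Wc (Uni g) v + rem.length ≤ m →
      (∀ x ∈ rem, x ∈ Uni g) → SOKE g s →
      Wc (Uni g) v ≤ fa →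
      PsiE g (rem.map (fun x => (false, x)) ++ (true, n) :: s) v ≤ fb →
      machE g fb (rem.map (fun x => (false, x)) ++ (true, n) :: s) v =
        (if (goA g fa n rem v).1 then goA g fa n rem v
         else machE g fb s (goA g fa n rem v).2) := by
  intro m
  induction m using Nat.strong_induction_on with
  | _ m IH =>
    intro n rem v s fa fb hm hrem hs hfa hfb
    have hfb1 : 1 ≤ fb := by
      have : 1 ≤ PsiE g (rem.map (fun x => (false, x)) ++ (true, n) :: s) v := by
        unfold PsiE; simp; omega
      omega
    obtain ⟨fb', rfl⟩ : ∃ f, fb = f + 1 := ⟨fb - 1, by omega⟩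
    match rem with
    | [] =>
      rw [goA_nilE]
      simp only [List.map_nil, List.nil_append, machE, Bool.false_eq_true, if_false]
      have hW : Wc (UniB g) (v.insert n 2) ≤ Wc (UniB g) v := Wc_insert_le _ v n 2 two_ne_zero
      have hpsi : PsiE g s (v.insert n 2) ≤ fb' := by
        unfold PsiE at hfb ⊢
        have : (lbLen g + 1) * Wc (UniB g) (v.insert n 2) ≤ (lbLen g + 1) * Wc (UniB g) v :=
          Nat.mul_le_mul_left _ hW
        simp only [List.map_nil, List.nil_append, List.length_cons] at hfb
        omega
      exact (machE_mono g fb' s (v.insert n 2) hs hpsi).symm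
    | nb :: rest =>
      by_cases h1 : v.getD nb 0 = 1
      · rw [goA_gray g fa n nb rest v h1]
        simp [machE, h1]
      · by_cases h0 : v.getD nb 0 = 0
        · -- white neighbour: push its events in B, recursive dfs in A
          have hnb : nb ∈ Uni g := hrem nb List.mem_cons_self
          have hnbB : nb ∈ UniB g := uni_sub g nb hnb
          have hW1 : 1 ≤ Wc (Uni g) v := Wc_pos _ v nb hnb h0
          obtain ⟨fa', rfl⟩ : ∃ f, fa = f + 1 := ⟨fa - 1, by omega⟩
          have hWltA : Wc (Uni g) (v.insert nb 1) < Wc (Uni g) v := Wc_insert_lt _ v nb hnb h0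
          have hWltB : Wc (UniB g) (v.insert nb 1) < Wc (UniB g) v := Wc_insert_lt _ v nb hnbB h0
          have hlenB : (adj g nb).length ≤ lbLen g := by
            rw [adj_eq_nbrsA]; exact le_trans (nbrs_len g nb) (fuelA_le_lbLen g)
          set S := rest.map (fun x => (false, x)) ++ (true, n) :: s with hS
          have hSOK : SOKE g S := by
            intro e he
            rcases List.mem_append.1 he with hmap | hrest
            · rcases List.mem_map.1 hmap with ⟨x, hx, rfl⟩
              intro _
              exact uni_sub g x (hrem x (List.mem_cons_of_mem _ hx))
            · rcases List.mem_cons.1 hrest with rfl | hs'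
              · intro h; cases h
              · exact hs e hs'
          have hpsi_child :
              PsiE g ((nbrsA g nb).map (fun x => (false, x)) ++ (true, nb) :: S)
                (v.insert nb 1) ≤ fb' := by
            unfold PsiE at hfb ⊢
            have hmul : (lbLen g + 1) * (Wc (UniB g) (v.insert nb 1) + 1) ≤
                (lbLen g + 1) * Wc (UniB g) v := Nat.mul_le_mul_left _ (by omega)
            rw [Nat.mul_add, Nat.mul_one] at hmul
            have hlenA : (nbrsA g nb).length ≤ lbLen g :=
              le_trans (nbrs_len g nb) (fuelA_le_lbLen g)
            simp only [hS, List.length_append, List.length_map, List.length_cons,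
              List.map_cons, List.cons_append] at hfb ⊢
            omega
          -- B's one pop step, then one unit of fuel restored by monotonicity
          have hstep : machE g (fb' + 1) ((nb :: rest).map (fun x => (false, x)) ++ (true, n) :: s) v =
              machE g (fb' + 1) ((nbrsA g nb).map (fun x => (false, x)) ++ (true, nb) :: S)
                (v.insert nb 1) := by
            simp only [List.map_cons, List.cons_append, machE, if_neg h1, if_pos h0,
              adj_eq_nbrsA, hS]
            exact (machE_mono g fb' _ _ (by
              intro e he
              rcases List.mem_append.1 he with hmap | hrest
              · rcases List.mem_map.1 hmap with ⟨x, hx, rfl⟩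
                intro _
                exact uni_sub g x (nbrs_sub g nb x hx)
              · rcases List.mem_cons.1 hrest with rfl | hs'
                · intro h; cases h
                · exact hSOK e hs') hpsi_child).symm
          rw [hstep]
          set r := goA g fa' nb (nbrsA g nb) (v.insert nb 1) with hr_def
          have hchild := IH ((fuelA g + 1) * Wc (Uni g) (v.insert nb 1) + (nbrsA g nb).length)
            (by
              have hmul : (fuelA g + 1) * (Wc (Uni g) (v.insert nb 1) + 1) ≤
                  (fuelA g + 1) * Wc (Uni g) v := Nat.mul_le_mul_left _ (by omega)
              rw [Nat.mul_add, Nat.mul_one] at hmul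
              have := nbrs_len g nb
              simp only [List.length_cons] at hm
              omega)
            nb (nbrsA g nb) (v.insert nb 1) S fa' (fb' + 1)
            (le_refl _) (nbrs_sub g nb) hSOK (by omega) (le_trans hpsi_child (by omega))
          rw [hchild, ← hr_def]
          have hA : goA g (fa' + 1) n (nb :: rest) v =
              (if r.1 then (true, r.2) else goA g (fa' + 1) n rest r.2) :=
            goA_white g n nb rest v fa' h1 h0
          rw [hA]
          by_cases hr : r.1 = true
          · have h2 : (if r.1 = true then ((true : Bool), r.2) else goA g (fa' + 1) n rest r.2)
                = (true, r.2) := if_pos hr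
            rw [h2, if_pos hr,
              if_pos (show ((true, r.2) : Bool × PySem.Dict Int Int).1 = true from rfl)]
            exact Prod.ext hr rfl
          · have h2 : (if r.1 = true then ((true : Bool), r.2) else goA g (fa' + 1) n rest r.2)
                = goA g (fa' + 1) n rest r.2 := if_neg hr
            rw [h2, if_neg hr]
            have hWr : Wc (Uni g) r.2 ≤ Wc (Uni g) (v.insert nb 1) := by
              rw [hr_def]; exact goA_W_le g _ fa' nb (nbrsA g nb) (v.insert nb 1)
            have hWrB : Wc (UniB g) r.2 ≤ Wc (UniB g) (v.insert nb 1) := by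
              rw [hr_def]; exact goA_W_le g _ fa' nb (nbrsA g nb) (v.insert nb 1)
            exact IH ((fuelA g + 1) * Wc (Uni g) r.2 + rest.length)
              (by
                have hmul : (fuelA g + 1) * (Wc (Uni g) r.2 + 1) ≤
                    (fuelA g + 1) * Wc (Uni g) v := Nat.mul_le_mul_left _ (by omega)
                rw [Nat.mul_add, Nat.mul_one] at hmul
                simp only [List.length_cons] at hm
                omega)
              n rest r.2 s (fa' + 1) (fb' + 1)
              (le_refl _) (fun x hx => hrem x (List.mem_cons_of_mem _ hx)) hs (by omega)
              (by
                unfold PsiE at hfb ⊢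
                have : (lbLen g + 1) * Wc (UniB g) r.2 ≤ (lbLen g + 1) * Wc (UniB g) v :=
                  Nat.mul_le_mul_left _ (by omega)
                simp only [List.length_append, List.length_map, List.length_cons] at hfb ⊢
                omega)
        · -- black neighbour: both sides skip it
          rw [goA_black g fa n nb rest v h1 h0]
          have hpsi_rest : PsiE g (rest.map (fun x => (false, x)) ++ (true, n) :: s) v ≤ fb' := by
            unfold PsiE at hfb ⊢
            simp only [List.length_append, List.length_map, List.length_cons] at hfb ⊢
            omega
          have hSOK' : SOKE g (rest.map (fun x => (false, x)) ++ (true, n) :: s) := by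
            intro e he
            rcases List.mem_append.1 he with hmap | hrest
            · rcases List.mem_map.1 hmap with ⟨x, hx, rfl⟩
              intro _
              exact uni_sub g x (hrem x (List.mem_cons_of_mem _ hx))
            · rcases List.mem_cons.1 hrest with rfl | hs'
              · intro h; cases h
              · exact hs e hs'
          have hstep : machE g (fb' + 1) ((nb :: rest).map (fun x => (false, x)) ++ (true, n) :: s) v =
              machE g (fb' + 1) (rest.map (fun x => (false, x)) ++ (true, n) :: s) v := by
            simp only [List.map_cons, List.cons_append, machE, if_neg h1, if_neg h0]
            exact (machE_mono g fb' _ _ hSOK' hpsi_rest).symm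
          rw [hstep]
          exact IH ((fuelA g + 1) * Wc (Uni g) v + rest.length)
            (by simp only [List.length_cons] at hm; omega)
            n rest v s fa (fb' + 1) (le_refl _)
            (fun x hx => hrem x (List.mem_cons_of_mem _ hx)) hs hfa
            (le_trans hpsi_rest (by omega))

-- the per-root step: B's whole event machine on a white root equals A's dfs call
theorem step_eq (g : List (Int × List Int)) (root : Int) (v : PySem.Dict Int Int)
    (hroot : root ∈ UniB g) (h0 : v.getD root 0 = 0) :
    machE g (fuelE g) [(false, root)] v =
      (let r := goA g (fuelA g) root (nbrsA g root) (v.insert root 1)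
       if r.1 then (true, r.2) else (false, r.2)) := by
  have hL : fuelE g = ((fuelE g - 1) + 1) := by
    unfold fuelE; have : 1 ≤ (lbLen g + 1) * (lbLen g + 2) := Nat.one_le_iff_ne_zero.2 (by positivity)
    omega
  set F := fuelE g - 1 with hF
  have hWb : Wc (UniB g) (v.insert root 1) < Wc (UniB g) v := Wc_insert_lt _ v root hroot h0
  have hWub : Wc (UniB g) v ≤ lbLen g := le_trans (Wc_le_len _ _) (le_of_eq rfl)
  have hpsi1 : PsiE g ((nbrsA g root).map (fun x => (false, x)) ++ [(true, root)])
      (v.insert root 1) + 1 ≤ fuelE g := by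
    unfold PsiE fuelE
    have hlenA : (nbrsA g root).length ≤ lbLen g :=
      le_trans (nbrs_len g root) (fuelA_le_lbLen g)
    have hmul : (lbLen g + 1) * (Wc (UniB g) (v.insert root 1) + 1) ≤
        (lbLen g + 1) * lbLen g := Nat.mul_le_mul_left _ (by omega)
    rw [Nat.mul_add, Nat.mul_one] at hmul
    simp only [List.length_append, List.length_map, List.length_cons, List.length_nil]
    nlinarith
  have hpsi : PsiE g ((nbrsA g root).map (fun x => (false, x)) ++ [(true, root)])
      (v.insert root 1) ≤ F := by omega
  have hstep : machE g (fuelE g) [(false, root)] v =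
      machE g F ((nbrsA g root).map (fun x => (false, x)) ++ [(true, root)])
        (v.insert root 1) := by
    rw [hL]
    simp only [machE, if_pos h0, adj_eq_nbrsA]
    have h1 : ¬ v.getD root 0 = 1 := by omega
    simp [h1]
  rw [hstep]
  have hsim := main_sim g ((fuelA g + 1) * Wc (Uni g) (v.insert root 1) + (nbrsA g root).length)
    root (nbrsA g root) (v.insert root 1) [] (fuelA g) F (le_refl _)
    (nbrs_sub g root) (by intro e he; cases he)
    (le_trans (Wc_le_len _ _) (le_of_eq rfl)) hpsi
  rw [hsim]
  set r := goA g (fuelA g) root (nbrsA g root) (v.insert root 1) with hr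
  by_cases hb : r.1 = true
  · simp only [hb, if_true]
    exact Prod.ext hb rfl
  · simp only [Bool.not_eq_true] at hb
    simp [hb, machE_nil]

-- the outer loops agree: B's key recursion computes A's fold
theorem outer_eq (g : List (Int × List Int)) :
    ∀ (ks : List Int) (cnt : Int) (v : PySem.Dict Int Int),
      (∀ k ∈ ks, k ∈ UniB g) →
      countB g ks cnt v =
        (ks.foldl (fun (st : Int × PySem.Dict Int Int) node =>
          if st.2.getD node 0 = 0 then
            let r := goA g (fuelA g) node (nbrsA g node) (st.2.insert node 1)
            if r.1 then (st.1 + 1, r.2) else (st.1, r.2)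
          else st) (cnt, v)).1 := by
  intro ks
  induction ks with
  | nil => intro cnt v _; simp [countB]
  | cons root ks ih =>
    intro cnt v hks
    simp only [countB, List.foldl_cons]
    by_cases h0 : v.getD root 0 = 0
    · rw [if_pos h0, if_pos h0,
        step_eq g root v (hks root List.mem_cons_self) h0]
      set r := goA g (fuelA g) root (nbrsA g root) (v.insert root 1) with hr
      by_cases hb : r.1 = true
      · simp only [hb, if_true]
        exact ih (cnt + 1) r.2 (fun k hk => hks k (List.mem_cons_of_mem _ hk))
      · simp only [Bool.not_eq_true] at hb
        simp only [hb, Bool.false_eq_true, if_false]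
        exact ih cnt r.2 (fun k hk => hks k (List.mem_cons_of_mem _ hk))
    · rw [if_neg h0, if_neg h0]
      exact ih cnt v (fun k hk => hks k (List.mem_cons_of_mem _ hk))

theorem ports_eq (g : List (Int × List Int)) : cycle_graph g = cycle_graph_alt g := by
  unfold cycle_graph cycle_graph_alt
  rw [outer_eq g (g.map Prod.fst) 0 PySem.Dict.empty
    (fun k hk => List.mem_append.2 (Or.inl hk))]

-- ===== VERDICT (by name: the statement is the Claim_ definition above) =====
theorem cycle_graph_spec : Claim_equal_cycle_graph := by
  intro graph _
  unfold Spec_cycle_graph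
  exact ports_eq graph
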